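-- pv_equiv track=rewrite | github.com/pyqtgraph/pyqtgraph | pyqtgraph/widgets/ValueLabel.py | superscript_number
-- ===== SOURCE A (Python) =====
-- def superscript_number(number):
--     ss_dict = {
--         '0': '⁰',
--         '1': '¹',
--         '2': '²',
--         '3': '³',
--         '4': '⁴',
--         '5': '⁵',
--         '6': '⁶',
--         '7': '⁷',
--         '8': '⁸',
--         '9': '⁹',
--         '-': '⁻',
--         '−': '⁻'
--     }
--     number = str(number)
--     for d in ss_dict:
--         number = number.replace(d, ss_dict[d])
--     return number
-- ===== SOURCE B (Python) =====
-- def superscript_number(number):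
--     sup = "⁰¹²³⁴⁵⁶⁷⁸⁹"
--     sign = ""
--     n = number
--     if n < 0:
--         sign = "⁻"
--         n = -n
--     if n == 0:
--         return sign + sup[0]
--     out = []
--     while n:
--         out.append(sup[n % 10])
--         n //= 10
--     return sign + ''.join(reversed(out))
-- ===== Notes on version B (the rewrite author's own statement) =====
-- stated objective: alternative
-- what changed: B computes the digits arithmetically by repeated divmod, indexing a fixed superscript alphabet (with a separate sign step), instead of A's twelve sequential whole-string replace passes over str(number).
import Mathlib
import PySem

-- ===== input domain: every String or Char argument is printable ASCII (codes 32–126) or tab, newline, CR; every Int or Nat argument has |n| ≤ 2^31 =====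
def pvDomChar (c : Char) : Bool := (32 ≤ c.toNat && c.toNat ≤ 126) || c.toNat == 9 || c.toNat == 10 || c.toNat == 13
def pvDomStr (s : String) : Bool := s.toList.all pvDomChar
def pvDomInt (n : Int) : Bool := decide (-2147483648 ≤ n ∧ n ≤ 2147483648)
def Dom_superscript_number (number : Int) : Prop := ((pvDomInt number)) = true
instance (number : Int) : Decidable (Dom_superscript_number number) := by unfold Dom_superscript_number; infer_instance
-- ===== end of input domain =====

-- B computes the digits arithmetically by repeated divmod and indexes a fixed superscript
-- alphabet, instead of A's twelve whole-string replace passes over str(number) (objective: alternative).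

-- ===== PORT A =====
-- the dict's (key, value) pairs, in Python's insertion order (the loop iterates the keys in this order)
def ssPairs : List (Char × Char) :=
  [('0','⁰'),('1','¹'),('2','²'),('3','³'),('4','⁴'),('5','⁵'),
   ('6','⁶'),('7','⁷'),('8','⁸'),('9','⁹'),('-','⁻'),('−','⁻')]

-- the for-loop over the dict's keys: one replace pass per (key, value) pair, in order
def applyReplaces : List (Char × Char) → List Char → List Char
  | [], s => s
  | (k, v) :: rest, s => applyReplaces rest (PySem.Chars.replace s [k] [v])

def superscript_number (number : Int) : String :=
  String.mk (applyReplaces ssPairs (PySem.Int.toChars number))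

-- ===== PORT B =====
-- sup = "⁰¹²³⁴⁵⁶⁷⁸⁹"
def pvSup : List Char := ['⁰','¹','²','³','⁴','⁵','⁶','⁷','⁸','⁹']

-- the while loop: out = [sup[n%10], sup[(n//10)%10], …] (least-significant digit first)
def pvDigitsRev (n : Nat) : List Char :=
  if h : n = 0 then []
  else pvSup.getD (n % 10) ' ' :: pvDigitsRev (n / 10)
decreasing_by exact Nat.div_lt_self (Nat.pos_of_ne_zero h) (by omega)

def superscript_number_alt (number : Int) : String :=
  let sign : List Char := if number < 0 then ['⁻'] else []
  let n := number.natAbs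
  if n = 0 then String.mk (sign ++ [pvSup.getD 0 ' '])
  else String.mk (sign ++ (pvDigitsRev n).reverse)

-- ===== PRECONDITION & SPEC =====
def Spec_superscript_number (number : Int) (out : String) : Prop := out = superscript_number_alt number
instance (number : Int) (out : String) : Decidable (Spec_superscript_number number out) := by unfold Spec_superscript_number; infer_instance

-- ===== CLAIM (what is proved, stated in full; the proofs are below) =====
def Claim_equal_superscript_number : Prop := ∀ (number : Int), Dom_superscript_number number → Spec_superscript_number number (superscript_number number)

-- ===== LEMMAS AND PROOFS =====
theorem go_single (k v : Char) : ∀ (cs : List Char) (fuel : Nat) (acc : List Char),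
    cs.length ≤ fuel →
    PySem.Chars.replace.go [k] [v] fuel cs acc
      = acc.reverse ++ cs.map (fun c => if c = k then v else c) := by
  intro cs
  induction cs with
  | nil =>
    intro fuel acc h
    cases fuel <;> simp [PySem.Chars.replace.go]
  | cons c t ih =>
    intro fuel acc h
    cases fuel with
    | zero => simp at h
    | succ f =>
      rw [PySem.Chars.replace.go]
      have ht : t.length ≤ f := by simpa using h
      by_cases hc : c = k
      · subst hc
        simp [List.isPrefixOf, ih f (v :: acc) ht]
      · have hk : ¬ k = c := fun e => hc e.symm
        simp [List.isPrefixOf, hk, ih f (c :: acc) ht, hc]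

-- replacing a single-char pattern by a single char is a per-character map
theorem replace_single (k v : Char) (cs : List Char) :
    PySem.Chars.replace cs [k] [v] = cs.map (fun c => if c = k then v else c) := by
  simp [PySem.Chars.replace, go_single k v cs cs.length [] le_rfl]

-- applying a pair list's substitutions one char at a time
def subst1 : List (Char × Char) → Char → Char
  | [], c => c
  | (k, v) :: rest, c => subst1 rest (if c = k then v else c)

-- the sequence of whole-string replace passes is one per-character map
theorem applyReplaces_eq_map (ps : List (Char × Char)) (cs : List Char) :
    applyReplaces ps cs = cs.map (subst1 ps) := by
  induction ps generalizing cs with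
  | nil => simp [applyReplaces, subst1]
  | cons p rest ih =>
    obtain ⟨k, v⟩ := p
    rw [applyReplaces, replace_single, ih, List.map_map]
    rfl

-- the digits of m (most-significant first), as characters
def natDigs (m : Nat) : List Char :=
  if _h : m < 10 then [Nat.digitChar m]
  else natDigs (m / 10) ++ [Nat.digitChar (m % 10)]
decreasing_by exact Nat.div_lt_self (by omega) (by omega)

theorem toDigitsCore_eq (m : Nat) : ∀ (fuel : Nat) (ds : List Char), m < fuel →
    Nat.toDigitsCore 10 fuel m ds = natDigs m ++ ds := by
  induction m using Nat.strong_induction_on with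
  | _ m ih =>
    intro fuel ds hf
    cases fuel with
    | zero => omega
    | succ f =>
      rw [Nat.toDigitsCore]
      by_cases h : m / 10 = 0
      · have hm : m < 10 := by omega
        simp [h, natDigs, hm, Nat.mod_eq_of_lt hm]
      · have hm : ¬ m < 10 := by omega
        have hlt : m / 10 < m := Nat.div_lt_self (by omega) (by omega)
        rw [if_neg h]
        conv_rhs => rw [natDigs]
        rw [dif_neg hm, ih (m / 10) hlt f _ (by omega)]
        simp

theorem toDigits_eq (m : Nat) : Nat.toDigits 10 m = natDigs m := by
  rw [Nat.toDigits, toDigitsCore_eq m (m + 1) [] (by omega), List.append_nil]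

-- applying A's chained substitutions to a digit character gives the superscript alphabet entry
theorem subst1_digitChar (d : Nat) (hd : d < 10) :
    subst1 ssPairs (Nat.digitChar d) = pvSup.getD d ' ' := by
  interval_cases d <;> decide

theorem map_natDigs (m : Nat) :
    (natDigs m).map (subst1 ssPairs)
      = if m = 0 then [pvSup.getD 0 ' '] else (pvDigitsRev m).reverse := by
  induction m using Nat.strong_induction_on with
  | _ m ih =>
    by_cases h : m < 10
    · rw [natDigs, dif_pos h]
      by_cases h0 : m = 0
      · subst h0; decide
      · rw [if_neg h0, pvDigitsRev, dif_neg h0]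
        have h10 : m / 10 = 0 := by omega
        rw [h10, pvDigitsRev]
        simp [Nat.mod_eq_of_lt h, subst1_digitChar m h]
    · have h0 : ¬ m = 0 := by omega
      have hq0 : ¬ m / 10 = 0 := by omega
      have hlt : m / 10 < m := Nat.div_lt_self (by omega) (by omega)
      rw [natDigs, dif_neg h, if_neg h0, pvDigitsRev, dif_neg h0]
      simp only [List.map_append, List.map_cons, List.map_nil, List.reverse_cons]
      rw [ih (m / 10) hlt, if_neg hq0, subst1_digitChar (m % 10) (Nat.mod_lt m (by omega))]

-- ===== VERDICT (by name: the statement is the Claim_ definition above) =====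
theorem superscript_number_spec : Claim_equal_superscript_number := by
  intro number _
  unfold Spec_superscript_number superscript_number superscript_number_alt
  rw [applyReplaces_eq_map, PySem.Int.toChars]
  by_cases hneg : number < 0
  · have hne : ¬ number.natAbs = 0 := by omega
    rw [if_pos hneg]
    simp only [List.map_cons, if_pos hneg, if_neg hne]
    rw [toDigits_eq, map_natDigs, if_neg hne]
    rfl
  · have habs : number.toNat = number.natAbs := by omega
    rw [if_neg hneg, habs, toDigits_eq, map_natDigs]
    simp only [if_neg hneg]
    by_cases h0 : number.natAbs = 0
    · rw [if_pos h0, if_pos h0]; rfl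
    · rw [if_neg h0, if_neg h0]; rfl
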